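-- pv_equiv track=rewrite | github.com/yichenelprosigma/python | problem11.py | obtener_min_max
-- ===== SOURCE A (Python) =====
-- def obtener_min_max(numero):
--     # Convertimos el número a cadena para recorrer sus dígitos
--     digitos = str(numero)
--
--     # Inicializamos min y max con el primer dígito
--     minimo = int(digitos[0])
--     maximo = int(digitos[0])
--     suma=0
--
--     # Recorremos los demás dígitos
--     for d in digitos:
--         d = int(d)
--         suma+=d
--         if d < minimo:
--             minimo = d
--         if d > maximo:
--             maximo = d
--
--     return minimo, maximo, suma
-- ===== SOURCE B (Python) =====
-- def obtener_min_max(numero):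
--     # Arithmetic digit extraction (no string conversion): peel digits with % and //
--     digits = []
--     n = numero
--     if n == 0:
--         digits = [0]
--     while n > 0:
--         digits.append(n % 10)
--         n //= 10
--     return (min(digits), max(digits), sum(digits))
-- ===== Notes on version B (the rewrite author's own statement) =====
-- stated objective: alternative
-- what changed: B extracts digits arithmetically with % 10 and // 10 into a list and applies min/max/sum builtins, instead of A's string conversion with a single manual accumulation pass over the characters.
import Mathlib
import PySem

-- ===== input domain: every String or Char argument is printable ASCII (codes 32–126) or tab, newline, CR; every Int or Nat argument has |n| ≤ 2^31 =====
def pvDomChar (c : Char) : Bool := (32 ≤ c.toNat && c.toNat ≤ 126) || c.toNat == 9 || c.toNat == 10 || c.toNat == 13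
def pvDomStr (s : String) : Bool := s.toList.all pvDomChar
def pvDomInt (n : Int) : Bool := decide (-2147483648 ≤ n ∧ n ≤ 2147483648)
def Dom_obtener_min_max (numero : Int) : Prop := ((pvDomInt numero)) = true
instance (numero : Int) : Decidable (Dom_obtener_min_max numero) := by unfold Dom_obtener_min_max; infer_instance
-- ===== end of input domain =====

-- B replaces A's string conversion and manual single-pass accumulation by arithmetic
-- digit extraction (% 10, // 10) followed by min/max/sum library reductions (objective: alternative).

-- ===== PORT A =====
def obtener_min_max (numero : Int) : Int × Int × Int :=
  -- digitos = str(numero)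
  let digitos := PySem.Int.toChars numero
  -- minimo = int(digitos[0]); maximo = int(digitos[0]); suma = 0
  let minimo := (PySem.Int.ofChars? [(PySem.List.pyGet? digitos 0).getD ' ']).getD 0
  let maximo := minimo
  let suma : Int := 0
  -- for d in digitos: d = int(d); suma += d; if d < minimo: …; if d > maximo: …
  digitos.foldl (fun st c =>
    let d := (PySem.Int.ofChars? [c]).getD 0
    let suma := st.2.2 + d
    let minimo := if d < st.1 then d else st.1
    let maximo := if d > st.2.1 then d else st.2.1
    (minimo, maximo, suma)) (minimo, maximo, suma)

-- ===== PORT B =====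
-- while n > 0: digits.append(n % 10); n //= 10   (digits least-significant first)
def pvDigitsB (n : Nat) : List Int :=
  if h : n = 0 then [] else ((n % 10 : Nat) : Int) :: pvDigitsB (n / 10)
  termination_by n
  decreasing_by exact Nat.div_lt_self (Nat.pos_of_ne_zero h) (by norm_num)

def obtener_min_max_alt (numero : Int) : Int × Int × Int :=
  let digits : List Int := if numero = 0 then [0] else pvDigitsB numero.toNat
  ((PySem.List.min? digits id).getD 0, (PySem.List.max? digits id).getD 0, digits.sum)

-- ===== PRECONDITION & SPEC =====
-- Pre_ excludes negative numero: there str(numero) starts with '-', so A's int(digitos[0])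
-- raises ValueError (and B's min([]) raises ValueError too).
def Pre_obtener_min_max (numero : Int) : Prop := 0 ≤ numero
instance (numero : Int) : Decidable (Pre_obtener_min_max numero) := by unfold Pre_obtener_min_max; infer_instance
def pvWitness_obtener_min_max : Int := 472

def Spec_obtener_min_max (numero : Int) (out : Int × Int × Int) : Prop := out = obtener_min_max_alt numero
instance (numero : Int) (out : Int × Int × Int) : Decidable (Spec_obtener_min_max numero out) := by unfold Spec_obtener_min_max; infer_instance

-- ===== CLAIM (what is proved, stated in full; the proofs are below) =====
def Claim_equal_obtener_min_max : Prop := ∀ (numero : Int), Dom_obtener_min_max numero → Pre_obtener_min_max numero → Spec_obtener_min_max numero (obtener_min_max numero)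

-- ===== LEMMAS AND PROOFS =====

-- MSB-first character list produced by Nat.toDigits (A's str(numero) for numero ≥ 0)
def pvChars (n : Nat) : List Char :=
  (if h : n / 10 = 0 then [] else pvChars (n / 10)) ++ [Nat.digitChar (n % 10)]
  termination_by n
  decreasing_by
    exact Nat.div_lt_self (Nat.pos_of_ne_zero (fun h0 => h (by simp [h0]))) (by norm_num)

lemma pvToDigitsCore_eq : ∀ (fuel n : Nat) (ds : List Char), n ≤ fuel →
    Nat.toDigitsCore 10 (fuel + 1) n ds = pvChars n ++ ds := by
  intro fuel
  induction fuel with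
  | zero =>
    intro n ds h
    interval_cases n
    simp [Nat.toDigitsCore, pvChars]
  | succ f ih =>
    intro n ds h
    rw [Nat.toDigitsCore]
    by_cases h10 : n / 10 = 0
    · rw [pvChars, dif_pos h10]
      simp [h10]
    · rw [if_neg h10]
      have hn : n ≠ 0 := fun h0 => h10 (by simp [h0])
      have hlt : n / 10 < n := Nat.div_lt_self (Nat.pos_of_ne_zero hn) (by norm_num)
      have hle : n / 10 ≤ f := by omega
      rw [ih (n / 10) _ hle]
      conv_rhs => rw [pvChars]
      rw [dif_neg h10]
      simp

lemma pvToDigits_eq (n : Nat) : Nat.toDigits 10 n = pvChars n := by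
  have := pvToDigitsCore_eq n n [] le_rfl
  simpa [Nat.toDigits] using this

lemma pvChars_ne_nil (n : Nat) : pvChars n ≠ [] := by
  rw [pvChars]; simp

-- value of a single digit character under int(d)
def pvVal (c : Char) : Int := (PySem.Int.ofChars? [c]).getD 0

lemma pvOfChars_digitChar (k : Nat) (hk : k < 10) :
    PySem.Int.ofChars? [Nat.digitChar k] = some (k : Int) := by
  interval_cases k <;> decide

lemma pvVal_digitChar (k : Nat) (hk : k < 10) : pvVal (Nat.digitChar k) = (k : Int) := by
  simp [pvVal, pvOfChars_digitChar k hk]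

lemma pvMapVal (n : Nat) (hn : n ≠ 0) : (pvChars n).map pvVal = (pvDigitsB n).reverse := by
  induction n using Nat.strong_induction_on with
  | _ n ih =>
    rw [pvChars, pvDigitsB, dif_neg hn]
    by_cases h10 : n / 10 = 0
    · rw [dif_pos h10, pvDigitsB, dif_pos h10]
      simp [pvVal_digitChar (n % 10) (Nat.mod_lt n (by norm_num))]
    · have hlt : n / 10 < n := Nat.div_lt_self (Nat.pos_of_ne_zero hn) (by norm_num)
      rw [dif_neg h10]
      simp [ih (n / 10) hlt h10, pvVal_digitChar (n % 10) (Nat.mod_lt n (by norm_num))]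

-- generic facts about folding a commutative, associative, idempotent op (used for min and max)
lemma pvFoldlOut (op : Int → Int → Int)
    (hc : ∀ a b, op a b = op b a) (ha : ∀ a b c, op (op a b) c = op a (op b c)) :
    ∀ (xs : List Int) (a x : Int), xs.foldl op (op a x) = op (xs.foldl op a) x := by
  intro xs
  induction xs with
  | nil => intro a x; simp
  | cons y ys ih =>
    intro a x
    have : op (op a x) y = op (op a y) x := by rw [ha, hc x y, ← ha]
    simp only [List.foldl_cons, this, ih]

lemma pvFoldlReverse (op : Int → Int → Int)
    (hc : ∀ a b, op a b = op b a) (ha : ∀ a b c, op (op a b) c = op a (op b c)) :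
    ∀ (xs : List Int) (a : Int), xs.reverse.foldl op a = xs.foldl op a := by
  intro xs
  induction xs with
  | nil => intro a; simp
  | cons y ys ih =>
    intro a
    simp only [List.reverse_cons, List.foldl_append, List.foldl_cons, List.foldl_nil, ih,
      List.foldl_cons]
    rw [← pvFoldlOut op hc ha]

lemma pvFoldlAbsorb (op : Int → Int → Int)
    (hc : ∀ a b, op a b = op b a) (ha : ∀ a b c, op (op a b) c = op a (op b c))
    (hi : ∀ a, op a a = a) :
    ∀ (xs : List Int) (a h : Int), h ∈ xs → xs.foldl op (op h a) = xs.foldl op a := by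
  intro xs
  induction xs with
  | nil => intro a h hmem; simp at hmem
  | cons y ys ih =>
    intro a h hmem
    rcases List.mem_cons.mp hmem with rfl | hmem
    · simp only [List.foldl_cons]
      congr 1
      rw [hc (op h a) h, ← ha h h a, hi, hc h a]
    · simp only [List.foldl_cons]
      have : op (op h a) y = op h (op a y) := ha h a y
      rw [this, ih (op a y) h hmem]

lemma pvFoldlHeadAbsorb (op : Int → Int → Int)
    (hc : ∀ a b, op a b = op b a) (ha : ∀ a b c, op (op a b) c = op a (op b c))
    (hi : ∀ a, op a a = a) (y h : Int) (ys : List Int) (hmem : h ∈ y :: ys) :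
    ys.foldl op (op h y) = ys.foldl op y := by
  rcases List.mem_cons.mp hmem with rfl | hmem
  · rw [hi]
  · exact pvFoldlAbsorb op hc ha hi ys y h hmem

lemma pvMinComm : ∀ a b : Int, min a b = min b a := fun a b => min_comm a b
lemma pvMinAssoc : ∀ a b c : Int, min (min a b) c = min a (min b c) := fun a b c => min_assoc a b c
lemma pvMaxComm : ∀ a b : Int, max a b = max b a := fun a b => max_comm a b
lemma pvMaxAssoc : ∀ a b c : Int, max (max a b) c = max a (max b c) := fun a b c => max_assoc a b c

-- A's explicit accumulation pass computes foldl min / foldl max / sum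
lemma pvFoldStep : ∀ (l : List Int) (a b s : Int),
    l.foldl (fun st d =>
      (if d < st.1 then d else st.1, if d > st.2.1 then d else st.2.1, st.2.2 + d)) (a, b, s)
    = (l.foldl min a, l.foldl max b, s + l.sum) := by
  intro l
  induction l with
  | nil => intro a b s; simp
  | cons x xs ih =>
    intro a b s
    simp only [List.foldl_cons, List.sum_cons, ih]
    have h1 : (if x < a then x else a) = min a x := by
      rw [min_def]; split_ifs <;> omega
    have h2 : (if x > b then x else b) = max b x := by
      rw [max_def]; split_ifs <;> omega
    rw [h1, h2, add_assoc]

-- Python's min/max over a nonempty Int list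
lemma pvMinCons : ∀ (ys : List Int) (y : Int),
    PySem.List.min? (y :: ys) id = some (ys.foldl min y) := by
  intro ys
  induction ys with
  | nil => intro y; simp [PySem.List.min?]
  | cons x xs ih =>
    intro y
    have h1 : PySem.List.min? (y :: x :: xs) id
        = PySem.List.min? ((if id x < id y then x else y) :: xs) id := by
      simp only [PySem.List.min?, List.foldl_cons, id_eq]
      by_cases hx : x < y <;> simp [hx]
    rw [h1, ih]
    congr 1
    rw [List.foldl_cons]
    congr 1
    simp only [id_eq]
    rw [min_def]; split_ifs <;> omega

lemma pvMaxCons : ∀ (ys : List Int) (y : Int),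
    PySem.List.max? (y :: ys) id = some (ys.foldl max y) := by
  intro ys
  induction ys with
  | nil => intro y; simp [PySem.List.max?]
  | cons x xs ih =>
    intro y
    have h1 : PySem.List.max? (y :: x :: xs) id
        = PySem.List.max? ((if id y < id x then x else y) :: xs) id := by
      simp only [PySem.List.max?, List.foldl_cons, id_eq]
      by_cases hx : y < x <;> simp [hx]
    rw [h1, ih]
    congr 1
    rw [List.foldl_cons]
    congr 1
    simp only [id_eq]
    rw [max_def]; split_ifs <;> omega

-- ===== VERDICT (by name: the statement is the Claim_ definition above) =====
theorem obtener_min_max_spec : Claim_equal_obtener_min_max := by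
  intro numero _ hpre
  unfold Spec_obtener_min_max
  by_cases h0 : numero = 0
  · subst h0; decide
  · have hpre' : (0 : Int) ≤ numero := hpre
    set m : Nat := numero.toNat with hm
    have hmne : m ≠ 0 := by omega
    have htc : PySem.Int.toChars numero = pvChars m := by
      simp only [PySem.Int.toChars, if_neg (not_lt.mpr hpre), pvToDigits_eq, hm]
    obtain ⟨c, cs, hcc⟩ := List.exists_cons_of_ne_nil (pvChars_ne_nil m)
    have hdig : pvDigitsB m = ((m % 10 : Nat) : Int) :: pvDigitsB (m / 10) := by
      rw [pvDigitsB]; rw [dif_neg hmne]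
    set y : Int := ((m % 10 : Nat) : Int) with hy
    set ys : List Int := pvDigitsB (m / 10) with hys
    have hmap : (pvChars m).map pvVal = (y :: ys).reverse := by
      rw [pvMapVal m hmne, hdig]
    have hA : obtener_min_max numero
        = ((pvChars m).map pvVal).foldl (fun st d =>
            (if d < st.1 then d else st.1, if d > st.2.1 then d else st.2.1, st.2.2 + d))
            (pvVal c, pvVal c, 0) := by
      rw [List.foldl_map]
      simp only [obtener_min_max, htc, hcc, PySem.List.pyGet?_zero_cons, Option.getD_some, pvVal]
    have hhead : pvVal c ∈ (y :: ys) := by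
      have hc : pvVal c ∈ (pvChars m).map pvVal := by rw [hcc]; simp
      rw [hmap, List.mem_reverse] at hc
      exact hc
    have hB : obtener_min_max_alt numero
        = (ys.foldl min y, ys.foldl max y, (y :: ys).sum) := by
      simp only [obtener_min_max_alt, if_neg h0, ← hm, hdig,
        pvMinCons, pvMaxCons, Option.getD_some]
    rw [hA, hmap, pvFoldStep, hB]
    refine Prod.ext ?_ (Prod.ext ?_ ?_)
    · show (y :: ys).reverse.foldl min (pvVal c) = ys.foldl min y
      rw [pvFoldlReverse min pvMinComm pvMinAssoc, List.foldl_cons]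
      exact pvFoldlHeadAbsorb min pvMinComm pvMinAssoc min_self y (pvVal c) ys hhead
    · show (y :: ys).reverse.foldl max (pvVal c) = ys.foldl max y
      rw [pvFoldlReverse max pvMaxComm pvMaxAssoc, List.foldl_cons]
      exact pvFoldlHeadAbsorb max pvMaxComm pvMaxAssoc max_self y (pvVal c) ys hhead
    · show 0 + ((y :: ys).reverse).sum = (y :: ys).sum
      simp [add_comm]
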